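-- pv_equiv track=rewrite | github.com/kaist-ina/TSPipe | tspipe/affinity_manager.py | num_cpus_for_gpu
-- ===== SOURCE A (Python) =====
-- from typing import Dict, List, Optional
--
-- def num_cpus_for_gpu(gpu_id: int, affinities: Dict) -> int:
--     cpu_map = {cpu: 0 for cpu in affinities[gpu_id]}
--     for aff_lst in affinities.values():
--         for cpu in aff_lst:
--             if cpu in cpu_map:
--                 cpu_map[cpu] += 1
--     max_gpu_per_cpu = max(cpu_map.values())
--     return min(len(affinities[gpu_id]) // max_gpu_per_cpu, 4)
-- ===== SOURCE B (Python) =====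
-- def num_cpus_for_gpu(gpu_id, affinities):
--     target = affinities[gpu_id]
--     max_gpu_per_cpu = max(sum(lst.count(cpu) for lst in affinities.values())
--                           for cpu in target)
--     return min(len(target) // max_gpu_per_cpu, 4)
-- ===== Notes on version B (the rewrite author's own statement) =====
-- stated objective: simpler
-- what changed: Drops the cpu_map count table entirely: B transposes the traversal, computing for each CPU of the target GPU the total occurrence count across all affinity lists directly, then takes the max.
import Mathlib
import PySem

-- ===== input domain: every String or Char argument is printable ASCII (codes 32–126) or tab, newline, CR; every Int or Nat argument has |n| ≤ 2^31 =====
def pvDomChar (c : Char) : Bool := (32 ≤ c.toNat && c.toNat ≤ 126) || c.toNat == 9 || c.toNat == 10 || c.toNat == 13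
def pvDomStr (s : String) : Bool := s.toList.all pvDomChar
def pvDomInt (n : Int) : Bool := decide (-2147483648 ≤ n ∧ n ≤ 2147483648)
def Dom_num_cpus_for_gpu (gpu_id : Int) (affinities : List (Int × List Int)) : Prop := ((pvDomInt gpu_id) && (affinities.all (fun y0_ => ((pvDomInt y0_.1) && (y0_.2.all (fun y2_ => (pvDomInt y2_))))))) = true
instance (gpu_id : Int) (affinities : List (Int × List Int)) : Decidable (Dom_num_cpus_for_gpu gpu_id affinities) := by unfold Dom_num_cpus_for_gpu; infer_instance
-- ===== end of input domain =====

-- B drops A's cpu_map count table: it transposes the traversal, taking for each CPU of the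
-- target GPU the total occurrence count across all affinity lists directly (objective: simpler).

-- ===== PORT A =====
def num_cpus_for_gpu (gpu_id : Int) (affinities : List (Int × List Int)) : Int :=
  let aff := PySem.Dict.ofList affinities
  let target := aff.getD gpu_id []         -- affinities[gpu_id]; [] only outside Pre_ (KeyError)
  let cpu_map : PySem.Dict Int Int :=
    target.foldl (fun d cpu => d.insert cpu 0) PySem.Dict.empty
  let cpu_map :=
    aff.values.foldl
      (fun d aff_lst =>
        aff_lst.foldl (fun d cpu => if d.contains cpu then d.modify cpu 0 (· + 1) else d) d)
      cpu_map
  let max_gpu_per_cpu := (PySem.List.max? cpu_map.values (fun x => x)).getD 0  -- none = ValueError, outside Pre_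
  min (PySem.Int.floordiv (target.length : Int) max_gpu_per_cpu) 4

-- ===== PORT B =====
def num_cpus_for_gpu_alt (gpu_id : Int) (affinities : List (Int × List Int)) : Int :=
  let aff := PySem.Dict.ofList affinities
  let target := aff.getD gpu_id []         -- affinities[gpu_id]; [] only outside Pre_ (KeyError)
  let max_gpu_per_cpu :=
    (PySem.List.max?
      (target.map (fun cpu => (aff.values.map (fun lst => (lst.count cpu : Int))).sum))
      (fun x => x)).getD 0                 -- none = ValueError, outside Pre_
  min (PySem.Int.floordiv (target.length : Int) max_gpu_per_cpu) 4

-- ===== PRECONDITION & SPEC =====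
-- Pre_ excludes exactly the inputs where the Python A raises: gpu_id not a key of the dict
-- (KeyError) or an empty affinity list for gpu_id (ValueError from max of an empty sequence);
-- B raises the same exceptions there.
def Pre_num_cpus_for_gpu (gpu_id : Int) (affinities : List (Int × List Int)) : Prop :=
  (PySem.Dict.ofList affinities).getD gpu_id [] ≠ []
instance (gpu_id : Int) (affinities : List (Int × List Int)) : Decidable (Pre_num_cpus_for_gpu gpu_id affinities) := by unfold Pre_num_cpus_for_gpu; infer_instance

def pvWitness_num_cpus_for_gpu : Int × (List (Int × List Int)) := (0, [(0, [0, 1]), (1, [1, 2])])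

def Spec_num_cpus_for_gpu (gpu_id : Int) (affinities : List (Int × List Int)) (out : Int) : Prop := out = num_cpus_for_gpu_alt gpu_id affinities
instance (gpu_id : Int) (affinities : List (Int × List Int)) (out : Int) : Decidable (Spec_num_cpus_for_gpu gpu_id affinities out) := by unfold Spec_num_cpus_for_gpu; infer_instance

-- ===== CLAIM (what is proved, stated in full; the proofs are below) =====
def Claim_equal_num_cpus_for_gpu : Prop := ∀ (gpu_id : Int) (affinities : List (Int × List Int)), Dom_num_cpus_for_gpu gpu_id affinities → Pre_num_cpus_for_gpu gpu_id affinities → Spec_num_cpus_for_gpu gpu_id affinities (num_cpus_for_gpu gpu_id affinities)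

-- ===== LEMMAS AND PROOFS =====

-- A's guarded inner counting loop never changes the key set
lemma pv_keys_inner (lst : List Int) (d : PySem.Dict Int Int) :
    (lst.foldl (fun d cpu => if d.contains cpu then d.modify cpu 0 (· + 1) else d) d).keys
      = d.keys := by
  induction lst generalizing d with
  | nil => rfl
  | cons x xs ih =>
    simp only [List.foldl_cons]
    rw [ih]
    by_cases h : d.contains x
    · simp [h, PySem.Dict.keys_modify, PySem.Dict.keys_insert_of_contains _ _ h]
    · simp [h]

lemma pv_contains_inner (lst : List Int) (d : PySem.Dict Int Int) (c : Int) :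
    (lst.foldl (fun d cpu => if d.contains cpu then d.modify cpu 0 (· + 1) else d) d).contains c
      = d.contains c := by
  rw [PySem.Dict.contains_eq_decide_mem_keys, PySem.Dict.contains_eq_decide_mem_keys,
    pv_keys_inner]

-- A's inner loop adds to each already-present key the occurrence count of that key in lst
lemma pv_getD_inner (lst : List Int) (d : PySem.Dict Int Int) (c : Int) :
    (lst.foldl (fun d cpu => if d.contains cpu then d.modify cpu 0 (· + 1) else d) d).getD c 0
      = d.getD c 0 + if d.contains c then (lst.count c : Int) else 0 := by
  induction lst generalizing d with
  | nil => simp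
  | cons x xs ih =>
    simp only [List.foldl_cons]
    rw [ih]
    have hcont : ∀ (d' : PySem.Dict Int Int), d'.contains x →
        (d'.modify x 0 (· + 1)).contains c = d'.contains c := by
      intro d' h
      rw [PySem.Dict.contains_eq_decide_mem_keys, PySem.Dict.contains_eq_decide_mem_keys,
        PySem.Dict.keys_modify, PySem.Dict.keys_insert_of_contains _ _ h]
    by_cases h : d.contains x
    · rw [if_pos h, PySem.Dict.getD_modify, hcont d h]
      by_cases hcx : c = x
      · subst hcx
        simp [h]
        ring
      · simp [hcx, Ne.symm hcx]
    · rw [if_neg h]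
      by_cases hc : d.contains c
      · have hcx : x ≠ c := by rintro rfl; exact h hc
        simp [hc, hcx]
      · simp [hc]

lemma pv_keys_outer (lsts : List (List Int)) (d : PySem.Dict Int Int) :
    (lsts.foldl (fun d aff_lst =>
        aff_lst.foldl (fun d cpu => if d.contains cpu then d.modify cpu 0 (· + 1) else d) d)
        d).keys = d.keys := by
  induction lsts generalizing d with
  | nil => rfl
  | cons l ls ih => rw [List.foldl_cons, ih, pv_keys_inner]

-- A's whole counting loop adds, for each present key, its total occurrence count over all lists
lemma pv_getD_outer (lsts : List (List Int)) (d : PySem.Dict Int Int) (c : Int) :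
    (lsts.foldl (fun d aff_lst =>
        aff_lst.foldl (fun d cpu => if d.contains cpu then d.modify cpu 0 (· + 1) else d) d)
        d).getD c 0
      = d.getD c 0 + if d.contains c then (lsts.map (fun l => (l.count c : Int))).sum else 0 := by
  induction lsts generalizing d with
  | nil => simp
  | cons l ls ih =>
    rw [List.foldl_cons, ih, pv_getD_inner, pv_contains_inner]
    by_cases hc : d.contains c
    · simp [hc]; ring
    · simp [hc]

-- A's initialisation loop {cpu: 0 for cpu in target}
lemma pv_getD_init (target : List Int) (d : PySem.Dict Int Int) (c : Int) :
    (target.foldl (fun d cpu => d.insert cpu (0 : Int)) d).getD c 0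
      = if c ∈ target then 0 else d.getD c 0 := by
  induction target generalizing d with
  | nil => simp
  | cons x xs ih =>
    rw [List.foldl_cons, ih]
    by_cases hcx : c = x
    · subst hcx; by_cases hmem : c ∈ xs <;> simp [hmem]
    · by_cases hmem : c ∈ xs <;> simp [hmem, hcx, PySem.Dict.getD_insert]

lemma pv_keys_init (target : List Int) :
    (target.foldl (fun d cpu => d.insert cpu (0 : Int)) PySem.Dict.empty).keys
      = PySem.Set.ofList target := by
  have := PySem.Dict.keys_foldl_insert target (fun _ _ => (0 : Int)) PySem.Dict.empty
  simpa [PySem.Dict.keys_empty] using this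

-- with distinct keys, values is the key list mapped through getD
lemma pv_values_eq_map_getD (d : PySem.Dict Int Int) (h : d.keys.Nodup) :
    d.values = d.keys.map (fun k => d.getD k 0) := by
  show d.items.map _ = _
  have hk : d.keys = d.items.map (fun p => p.1) := rfl
  rw [hk, List.map_map]
  apply List.map_congr_left
  intro p hp
  exact (PySem.Dict.getD_of_mem_items d (by simpa using hp) h 0).symm

-- Python's max only depends on which elements occur, so it agrees on membership-equal lists
lemma pv_max_getD_congr (xs ys : List Int) (hmem : ∀ a, a ∈ xs ↔ a ∈ ys) (hne : xs ≠ []) :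
    (PySem.List.max? xs (fun x => x)).getD 0 = (PySem.List.max? ys (fun x => x)).getD 0 := by
  have hyne : ys ≠ [] := by
    obtain ⟨a, ha⟩ := List.exists_mem_of_ne_nil xs hne
    exact List.ne_nil_of_mem ((hmem a).mp ha)
  cases hm : PySem.List.max? xs (fun x => x) with
  | none => exact absurd ((PySem.List.max?_eq_none_iff xs _).mp hm) hne
  | some m =>
  cases hm' : PySem.List.max? ys (fun x => x) with
  | none => exact absurd ((PySem.List.max?_eq_none_iff ys _).mp hm') hyne
  | some m' =>
  have h1 : m ≤ m' := PySem.List.max?_isMax hm' m ((hmem m).mp (PySem.List.max?_mem hm))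
  have h2 : m' ≤ m := PySem.List.max?_isMax hm m' ((hmem m').mpr (PySem.List.max?_mem hm'))
  simpa using le_antisymm h1 h2

-- ===== VERDICT (by name: the statement is the Claim_ definition above) =====
theorem num_cpus_for_gpu_spec : Claim_equal_num_cpus_for_gpu := by
  intro gpu_id affinities _ hpre
  unfold Pre_num_cpus_for_gpu at hpre
  unfold Spec_num_cpus_for_gpu
  show min (PySem.Int.floordiv
      ((((PySem.Dict.ofList affinities).getD gpu_id []).length : Nat) : Int)
      ((PySem.List.max?
        ((PySem.Dict.ofList affinities).values.foldl
          (fun d aff_lst =>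
            aff_lst.foldl (fun d cpu => if d.contains cpu then d.modify cpu 0 (· + 1) else d) d)
          (((PySem.Dict.ofList affinities).getD gpu_id []).foldl
            (fun d cpu => d.insert cpu (0 : Int)) PySem.Dict.empty)).values
        (fun x => x)).getD 0)) 4
    = min (PySem.Int.floordiv
      ((((PySem.Dict.ofList affinities).getD gpu_id []).length : Nat) : Int)
      ((PySem.List.max?
        (((PySem.Dict.ofList affinities).getD gpu_id []).map
          (fun cpu => ((PySem.Dict.ofList affinities).values.map (fun lst => (lst.count cpu : Int))).sum))
        (fun x => x)).getD 0)) 4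
  have hvals :
      ((PySem.Dict.ofList affinities).values.foldl
        (fun d aff_lst =>
          aff_lst.foldl (fun d cpu => if d.contains cpu then d.modify cpu 0 (· + 1) else d) d)
        (((PySem.Dict.ofList affinities).getD gpu_id []).foldl
          (fun d cpu => d.insert cpu (0 : Int)) PySem.Dict.empty)).values
      = (PySem.Set.ofList ((PySem.Dict.ofList affinities).getD gpu_id [])).map
          (fun c => ((PySem.Dict.ofList affinities).values.map (fun lst => (lst.count c : Int))).sum) := by
    have hkeys : ((PySem.Dict.ofList affinities).values.foldl
        (fun d aff_lst =>
          aff_lst.foldl (fun d cpu => if d.contains cpu then d.modify cpu 0 (· + 1) else d) d)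
        (((PySem.Dict.ofList affinities).getD gpu_id []).foldl
          (fun d cpu => d.insert cpu (0 : Int)) PySem.Dict.empty)).keys
        = PySem.Set.ofList ((PySem.Dict.ofList affinities).getD gpu_id []) := by
      rw [pv_keys_outer, pv_keys_init]
    rw [pv_values_eq_map_getD _ (hkeys ▸ PySem.Set.nodup_ofList _), hkeys]
    apply List.map_congr_left
    intro k hk
    have hkt : k ∈ (PySem.Dict.ofList affinities).getD gpu_id [] :=
      (PySem.Set.mem_ofList _ k).mp hk
    have hcont : (((PySem.Dict.ofList affinities).getD gpu_id []).foldl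
        (fun d cpu => d.insert cpu (0 : Int)) PySem.Dict.empty).contains k = true := by
      rw [PySem.Dict.contains_eq_decide_mem_keys, pv_keys_init]
      simpa [PySem.Set.mem_ofList]
    rw [pv_getD_outer, hcont, pv_getD_init]
    simp [hkt]
  rw [hvals]
  rw [pv_max_getD_congr]
  · intro a
    simp only [List.mem_map]
    constructor
    · rintro ⟨c, hc, rfl⟩; exact ⟨c, (PySem.Set.mem_ofList _ c).mp hc, rfl⟩
    · rintro ⟨c, hc, rfl⟩; exact ⟨c, (PySem.Set.mem_ofList _ c).mpr hc, rfl⟩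
  · obtain ⟨a, ha⟩ := List.exists_mem_of_ne_nil _ hpre
    intro h
    have ha' := (PySem.Set.mem_ofList _ a).mpr ha
    rw [List.map_eq_nil_iff.mp h] at ha'
    simp at ha'
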